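-- pv_equiv track=rewrite | github.com/animicaorg/all | tests/fuzz/fuzz_p2p_messages.py | _frame_normalize_shape
-- ===== SOURCE A (Python) =====
-- def _frame_normalize_shape(frame: dict) -> dict:
--     msg_id = frame.get("msg_id", frame.get("msgId", frame.get("id")))
--     payload = frame.get("payload", frame.get("p"))
--     seq = frame.get("seq", frame.get("s"))
--     flags = frame.get("flags", frame.get("f"))
--     csum = frame.get("checksum", frame.get("csum"))
--     out = {"msg_id": msg_id, "payload": payload}
--     if seq is not None:
--         out["seq"] = seq
--     if flags is not None:
--         out["flags"] = flags
--     if csum is not None: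
--         out["checksum"] = csum
--     # keep extras
--     for k, v in frame.items():
--         if k not in ("msg_id", "msgId", "id", "payload", "p", "seq", "s", "flags", "f", "checksum", "csum"):
--             out[k] = v
--     return out
-- ===== SOURCE B (Python) =====
-- # canonical-key router: alias -> (canonical name, priority rank)
-- _RANK = {
--     "msg_id": ("msg_id", 0), "msgId": ("msg_id", 1), "id": ("msg_id", 2),
--     "payload": ("payload", 0), "p": ("payload", 1),
--     "seq": ("seq", 0), "s": ("seq", 1),
--     "flags": ("flags", 0), "f": ("flags", 1),
--     "checksum": ("checksum", 0), "csum": ("checksum", 1),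
-- }
--
--
-- def _frame_normalize_shape(frame: dict) -> dict:
--     # single pass over the frame: route each key through _RANK, keeping per
--     # canonical field the value of the lowest-rank alias seen; unknown keys
--     # are collected as extras in order.
--     best = {}
--     extras = []
--     for k, v in frame.items():
--         hit = _RANK.get(k)
--         if hit is None:
--             extras.append((k, v))
--         else:
--             canon, r = hit
--             if canon not in best or r < best[canon][0]:
--                 best[canon] = (r, v)
--     out = {"msg_id": best.get("msg_id", (0, None))[1],
--            "payload": best.get("payload", (0, None))[1]}
--     for canon in ("seq", "flags", "checksum"):
--         hit = best.get(canon)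
--         if hit is not None and hit[1] is not None:
--             out[canon] = hit[1]
--     out.update(extras)
--     return out
-- ===== Notes on version B (the rewrite author's own statement) =====
-- stated objective: alternative
-- what changed: Instead of A's per-field lookup chains into the frame, B makes a single pass over the frame items, routing each key through an alias->(canonical,rank) map and keeping per canonical field the lowest-rank value while collecting extras, then assembles the output from that accumulator.
import Mathlib
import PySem

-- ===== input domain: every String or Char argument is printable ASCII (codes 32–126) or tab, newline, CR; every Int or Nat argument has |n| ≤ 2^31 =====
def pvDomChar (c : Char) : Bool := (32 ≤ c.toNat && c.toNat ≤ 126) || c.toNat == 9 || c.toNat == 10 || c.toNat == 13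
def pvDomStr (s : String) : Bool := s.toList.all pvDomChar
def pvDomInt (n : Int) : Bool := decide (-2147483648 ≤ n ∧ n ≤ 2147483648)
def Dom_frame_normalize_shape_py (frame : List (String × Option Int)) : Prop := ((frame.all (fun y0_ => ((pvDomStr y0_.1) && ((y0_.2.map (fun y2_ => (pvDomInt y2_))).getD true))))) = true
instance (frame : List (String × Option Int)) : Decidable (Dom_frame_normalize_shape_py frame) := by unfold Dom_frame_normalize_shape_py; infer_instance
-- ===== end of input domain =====

-- B replaces A's per-field get-chains by a single routing pass over the frame items
-- (alias -> (canonical, rank) map, keep the lowest-rank value per field); objective: alternative.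


-- ===== PORT A =====
-- 'k not in ("msg_id", …, "csum")' in A's extras loop
def pvKnownTupleA (k : String) : Bool :=
  k == "msg_id" || k == "msgId" || k == "id" || k == "payload" || k == "p" ||
  k == "seq" || k == "s" || k == "flags" || k == "f" || k == "checksum" || k == "csum"

def frame_normalize_shape_py (frame : List (String × Option Int)) : List (String × Option Int) :=
  let d := PySem.Dict.mk frame
  let msg_id := d.getD "msg_id" (d.getD "msgId" (d.getD "id" none))
  let payload := d.getD "payload" (d.getD "p" none)
  let seq := d.getD "seq" (d.getD "s" none)
  let flags := d.getD "flags" (d.getD "f" none)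
  let csum := d.getD "checksum" (d.getD "csum" none)
  let out := (PySem.Dict.empty.insert "msg_id" msg_id).insert "payload" payload
  let out := if seq ≠ none then out.insert "seq" seq else out
  let out := if flags ≠ none then out.insert "flags" flags else out
  let out := if csum ≠ none then out.insert "checksum" csum else out
  let out := d.items.foldl (fun o kv => if ¬ pvKnownTupleA kv.1 then o.insert kv.1 kv.2 else o) out
  out.items

-- ===== PORT B =====
-- _RANK.get(k): the literal dict has distinct keys, so lookup is the first-match if-chain (exact)
def pvRank (k : String) : Option (String × Int) :=
  if k == "msg_id" then some ("msg_id", 0)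
  else if k == "msgId" then some ("msg_id", 1)
  else if k == "id" then some ("msg_id", 2)
  else if k == "payload" then some ("payload", 0)
  else if k == "p" then some ("payload", 1)
  else if k == "seq" then some ("seq", 0)
  else if k == "s" then some ("seq", 1)
  else if k == "flags" then some ("flags", 0)
  else if k == "f" then some ("flags", 1)
  else if k == "checksum" then some ("checksum", 0)
  else if k == "csum" then some ("checksum", 1)
  else none

-- the body of B's single routing pass
def pvStep (st : PySem.Dict String (Int × Option Int) × List (String × Option Int))
    (kv : String × Option Int) : PySem.Dict String (Int × Option Int) × List (String × Option Int) :=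
  match pvRank kv.1 with
  | none => (st.1, st.2 ++ [kv])
  | some (canon, r) =>
      (match st.1.get? canon with
       | none => st.1.insert canon (r, kv.2)
       | some p => if r < p.1 then st.1.insert canon (r, kv.2) else st.1, st.2)

def frame_normalize_shape_py_alt (frame : List (String × Option Int)) : List (String × Option Int) :=
  let d := PySem.Dict.mk frame
  let st := d.items.foldl pvStep (PySem.Dict.empty, [])
  let best := st.1
  let extras := st.2
  let out := (PySem.Dict.empty.insert "msg_id" (best.getD "msg_id" (0, none)).2).insert
      "payload" (best.getD "payload" (0, none)).2
  let out := ["seq", "flags", "checksum"].foldl (fun o canon =>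
      match best.get? canon with
      | some p => match p.2 with
        | some v => o.insert canon (some v)
        | none => o
      | none => o) out
  let out := out.update extras
  out.items

-- ===== PRECONDITION & SPEC =====
def Spec_frame_normalize_shape_py (frame : List (String × Option Int)) (out : List (String × Option Int)) : Prop := out = frame_normalize_shape_py_alt frame
instance (frame : List (String × Option Int)) (out : List (String × Option Int)) : Decidable (Spec_frame_normalize_shape_py frame out) := by unfold Spec_frame_normalize_shape_py; infer_instance

-- ===== CLAIM (what is proved, stated in full; the proofs are below) =====
def Claim_equal_frame_normalize_shape_py : Prop := ∀ (frame : List (String × Option Int)), Dom_frame_normalize_shape_py frame → Spec_frame_normalize_shape_py frame (frame_normalize_shape_py frame)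

-- ===== LEMMAS AND PROOFS =====

-- first-match lookup over an items list (d.get? a, by rfl)
def pvLk (l : List (String × Option Int)) (a : String) : Option (Option Int) :=
  (l.find? (fun kv => kv.1 == a)).map (·.2)

-- contribution of one frame item to canonical field c
def pvEntry (kv : String × Option Int) (c : String) : Option (Int × Option Int) :=
  match pvRank kv.1 with
  | some cr => if cr.1 == c then some (cr.2, kv.2) else none
  | none => none

-- keep the lower rank, ties to the left (earlier item)
def pvComb : Option (Int × Option Int) → Option (Int × Option Int) → Option (Int × Option Int)
  | none, b => b
  | some p, none => some p
  | some p, some q => if q.1 < p.1 then some q else some p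

def pvChain (l : List (String × Option Int)) (c : String) : Option (Int × Option Int) :=
  l.foldr (fun kv acc => pvComb (pvEntry kv c) acc) none

def pvVal (o : Option (Int × Option Int)) : Option Int :=
  match o with | some p => p.2 | none => none

theorem pv_mk_get? (l : List (String × Option Int)) (a : String) :
    (PySem.Dict.mk l).get? a = pvLk l a := rfl

theorem pv_lk_cons (kv : String × Option Int) (l : List (String × Option Int)) (a : String) :
    pvLk (kv :: l) a = if kv.1 == a then some kv.2 else pvLk l a := by
  simp only [pvLk, List.find?]
  cases h : kv.1 == a <;> simp [h]

theorem pv_chain_cons (kv : String × Option Int) (l : List (String × Option Int)) (c : String) :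
    pvChain (kv :: l) c = pvComb (pvEntry kv c) (pvChain l c) := rfl

theorem pv_comb_none_right (a : Option (Int × Option Int)) : pvComb a none = a := by
  cases a <;> rfl

theorem pv_comb_assoc (a b c : Option (Int × Option Int)) :
    pvComb (pvComb a b) c = pvComb a (pvComb b c) := by
  cases a with
  | none => rfl
  | some p => cases b with
    | none => rfl
    | some q => cases c with
      | none => rw [pv_comb_none_right, pv_comb_none_right]
      | some r =>
        by_cases h1 : q.1 < p.1 <;> by_cases h2 : r.1 < q.1 <;> by_cases h3 : r.1 < p.1 <;>
          simp [pvComb, h1, h2, h3] <;> omega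

theorem pv_step_fst_get? (st : PySem.Dict String (Int × Option Int) × List (String × Option Int))
    (kv : String × Option Int) (c : String) :
    (pvStep st kv).1.get? c = pvComb (st.1.get? c) (pvEntry kv c) := by
  unfold pvStep pvEntry
  cases h : pvRank kv.1 with
  | none => simp [pv_comb_none_right]
  | some cr =>
    obtain ⟨c', r⟩ := cr
    by_cases hc : c' = c
    · subst hc
      cases hg : st.1.get? c' with
      | none => simp [hg, PySem.Dict.get?_insert_self, pvComb]
      | some p =>
        by_cases hr : r < p.1
        · simp [hg, hr, PySem.Dict.get?_insert_self, pvComb]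
        · simp [hg, hr, pvComb]
    · have hbe : (c' == c) = false := by simp [hc]
      have hne : c ≠ c' := Ne.symm hc
      cases hg : st.1.get? c' with
      | none =>
        simp only [hg, hbe, Bool.false_eq_true, if_false,
          PySem.Dict.get?_insert_of_ne st.1 (r, kv.2) hne, pv_comb_none_right]
      | some p =>
        by_cases hr : r < p.1
        · simp only [hg, hbe, hr, Bool.false_eq_true, if_false, if_true,
            PySem.Dict.get?_insert_of_ne st.1 (r, kv.2) hne, pv_comb_none_right]
        · simp only [hg, hbe, hr, Bool.false_eq_true, if_false, pv_comb_none_right]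

theorem pv_step_snd (st : PySem.Dict String (Int × Option Int) × List (String × Option Int))
    (kv : String × Option Int) :
    (pvStep st kv).2 = st.2 ++ (if (pvRank kv.1).isNone then [kv] else []) := by
  unfold pvStep
  cases h : pvRank kv.1 with
  | none => simp
  | some cr => obtain ⟨c', r⟩ := cr; simp

theorem pv_fold_snd (l : List (String × Option Int))
    (st : PySem.Dict String (Int × Option Int) × List (String × Option Int)) :
    (l.foldl pvStep st).2 = st.2 ++ l.filter (fun kv => (pvRank kv.1).isNone) := by
  induction l generalizing st with
  | nil => simp
  | cons kv rest ih =>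
    rw [List.foldl_cons, ih, pv_step_snd, List.filter_cons]
    cases h : (pvRank kv.1).isNone <;> simp [h]

theorem pv_fold_fst_get? (l : List (String × Option Int))
    (st : PySem.Dict String (Int × Option Int) × List (String × Option Int)) (c : String) :
    (l.foldl pvStep st).1.get? c = pvComb (st.1.get? c) (pvChain l c) := by
  induction l generalizing st with
  | nil => simp [pvChain, pv_comb_none_right]
  | cons kv rest ih =>
    rw [List.foldl_cons, ih, pv_step_fst_get?, pv_comb_assoc]
    rfl

theorem pv_fold_fst_get?' (l : List (String × Option Int)) (c : String) :
    (l.foldl pvStep (PySem.Dict.empty, ([] : List (String × Option Int)))).1.get? c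
      = pvChain l c := by
  rw [pv_fold_fst_get?]; rfl

-- entry shapes, one per canonical field
theorem pv_entry_msg (kv : String × Option Int) :
    pvEntry kv "msg_id" = if kv.1 == "msg_id" then some ((0 : Int), kv.2)
      else if kv.1 == "msgId" then some ((1 : Int), kv.2)
      else if kv.1 == "id" then some ((2 : Int), kv.2) else none := by
  obtain ⟨k, v⟩ := kv
  by_cases h1 : k = "msg_id"; · subst h1; rfl
  by_cases h2 : k = "msgId"; · subst h2; rfl
  by_cases h3 : k = "id"; · subst h3; rfl
  by_cases h4 : k = "payload"; · subst h4; rfl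
  by_cases h5 : k = "p"; · subst h5; rfl
  by_cases h6 : k = "seq"; · subst h6; rfl
  by_cases h7 : k = "s"; · subst h7; rfl
  by_cases h8 : k = "flags"; · subst h8; rfl
  by_cases h9 : k = "f"; · subst h9; rfl
  by_cases h10 : k = "checksum"; · subst h10; rfl
  by_cases h11 : k = "csum"; · subst h11; rfl
  simp [pvEntry, pvRank, h1, h2, h3, h4, h5, h6, h7, h8, h9, h10, h11]

theorem pv_entry_payload (kv : String × Option Int) :
    pvEntry kv "payload" = if kv.1 == "payload" then some ((0 : Int), kv.2)
      else if kv.1 == "p" then some ((1 : Int), kv.2) else none := by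
  obtain ⟨k, v⟩ := kv
  by_cases h1 : k = "msg_id"; · subst h1; rfl
  by_cases h2 : k = "msgId"; · subst h2; rfl
  by_cases h3 : k = "id"; · subst h3; rfl
  by_cases h4 : k = "payload"; · subst h4; rfl
  by_cases h5 : k = "p"; · subst h5; rfl
  by_cases h6 : k = "seq"; · subst h6; rfl
  by_cases h7 : k = "s"; · subst h7; rfl
  by_cases h8 : k = "flags"; · subst h8; rfl
  by_cases h9 : k = "f"; · subst h9; rfl
  by_cases h10 : k = "checksum"; · subst h10; rfl
  by_cases h11 : k = "csum"; · subst h11; rfl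
  simp [pvEntry, pvRank, h1, h2, h3, h4, h5, h6, h7, h8, h9, h10, h11]

theorem pv_entry_seq (kv : String × Option Int) :
    pvEntry kv "seq" = if kv.1 == "seq" then some ((0 : Int), kv.2)
      else if kv.1 == "s" then some ((1 : Int), kv.2) else none := by
  obtain ⟨k, v⟩ := kv
  by_cases h1 : k = "msg_id"; · subst h1; rfl
  by_cases h2 : k = "msgId"; · subst h2; rfl
  by_cases h3 : k = "id"; · subst h3; rfl
  by_cases h4 : k = "payload"; · subst h4; rfl
  by_cases h5 : k = "p"; · subst h5; rfl
  by_cases h6 : k = "seq"; · subst h6; rfl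
  by_cases h7 : k = "s"; · subst h7; rfl
  by_cases h8 : k = "flags"; · subst h8; rfl
  by_cases h9 : k = "f"; · subst h9; rfl
  by_cases h10 : k = "checksum"; · subst h10; rfl
  by_cases h11 : k = "csum"; · subst h11; rfl
  simp [pvEntry, pvRank, h1, h2, h3, h4, h5, h6, h7, h8, h9, h10, h11]

theorem pv_entry_flags (kv : String × Option Int) :
    pvEntry kv "flags" = if kv.1 == "flags" then some ((0 : Int), kv.2)
      else if kv.1 == "f" then some ((1 : Int), kv.2) else none := by
  obtain ⟨k, v⟩ := kv
  by_cases h1 : k = "msg_id"; · subst h1; rfl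
  by_cases h2 : k = "msgId"; · subst h2; rfl
  by_cases h3 : k = "id"; · subst h3; rfl
  by_cases h4 : k = "payload"; · subst h4; rfl
  by_cases h5 : k = "p"; · subst h5; rfl
  by_cases h6 : k = "seq"; · subst h6; rfl
  by_cases h7 : k = "s"; · subst h7; rfl
  by_cases h8 : k = "flags"; · subst h8; rfl
  by_cases h9 : k = "f"; · subst h9; rfl
  by_cases h10 : k = "checksum"; · subst h10; rfl
  by_cases h11 : k = "csum"; · subst h11; rfl
  simp [pvEntry, pvRank, h1, h2, h3, h4, h5, h6, h7, h8, h9, h10, h11]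

theorem pv_entry_checksum (kv : String × Option Int) :
    pvEntry kv "checksum" = if kv.1 == "checksum" then some ((0 : Int), kv.2)
      else if kv.1 == "csum" then some ((1 : Int), kv.2) else none := by
  obtain ⟨k, v⟩ := kv
  by_cases h1 : k = "msg_id"; · subst h1; rfl
  by_cases h2 : k = "msgId"; · subst h2; rfl
  by_cases h3 : k = "id"; · subst h3; rfl
  by_cases h4 : k = "payload"; · subst h4; rfl
  by_cases h5 : k = "p"; · subst h5; rfl
  by_cases h6 : k = "seq"; · subst h6; rfl
  by_cases h7 : k = "s"; · subst h7; rfl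
  by_cases h8 : k = "flags"; · subst h8; rfl
  by_cases h9 : k = "f"; · subst h9; rfl
  by_cases h10 : k = "checksum"; · subst h10; rfl
  by_cases h11 : k = "csum"; · subst h11; rfl
  simp [pvEntry, pvRank, h1, h2, h3, h4, h5, h6, h7, h8, h9, h10, h11]

-- two-alias chain characterisation
theorem pv_chain_two (c a1 a2 : String)
    (he : ∀ kv : String × Option Int, pvEntry kv c = if kv.1 == a1 then some ((0 : Int), kv.2)
      else if kv.1 == a2 then some ((1 : Int), kv.2) else none)
    (l : List (String × Option Int)) :
    pvChain l c = match pvLk l a1 with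
      | some v => some ((0 : Int), v)
      | none => match pvLk l a2 with
        | some v => some ((1 : Int), v)
        | none => none := by
  induction l with
  | nil => rfl
  | cons kv l ih =>
    rw [pv_chain_cons, he, pv_lk_cons, pv_lk_cons, ih]
    cases h1 : kv.1 == a1 <;> cases h2 : kv.1 == a2 <;>
      cases hl1 : pvLk l a1 <;> cases hl2 : pvLk l a2 <;>
        simp [pvComb, h1, h2, hl1, hl2]

-- three-alias chain characterisation (msg_id)
theorem pv_chain_msg (l : List (String × Option Int)) :
    pvChain l "msg_id" = match pvLk l "msg_id" with
      | some v => some ((0 : Int), v)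
      | none => match pvLk l "msgId" with
        | some v => some ((1 : Int), v)
        | none => match pvLk l "id" with
          | some v => some ((2 : Int), v)
          | none => none := by
  induction l with
  | nil => rfl
  | cons kv l ih =>
    rw [pv_chain_cons, pv_entry_msg, pv_lk_cons, pv_lk_cons, pv_lk_cons, ih]
    cases h1 : kv.1 == "msg_id" <;> cases h2 : kv.1 == "msgId" <;> cases h3 : kv.1 == "id" <;>
      cases hl1 : pvLk l "msg_id" <;> cases hl2 : pvLk l "msgId" <;> cases hl3 : pvLk l "id" <;>
        simp [pvComb, h1, h2, h3, hl1, hl2, hl3]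

theorem pv_val_match3 (x1 x2 x3 : Option (Option Int)) :
    pvVal (match x1 with
      | some v => some ((0 : Int), v)
      | none => match x2 with
        | some v => some ((1 : Int), v)
        | none => match x3 with
          | some v => some ((2 : Int), v)
          | none => none) = x1.getD (x2.getD (x3.getD none)) := by
  cases x1 <;> cases x2 <;> cases x3 <;> rfl

theorem pv_val_match2 (x1 x2 : Option (Option Int)) :
    pvVal (match x1 with
      | some v => some ((0 : Int), v)
      | none => match x2 with
        | some v => some ((1 : Int), v)
        | none => none) = x1.getD (x2.getD none) := by
  cases x1 <;> cases x2 <;> rfl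

theorem pv_getD_snd (o : Option (Int × Option Int)) :
    (o.getD (0, none)).2 = pvVal o := by cases o <;> rfl

theorem pv_opt_insert (o : Option (Int × Option Int)) (c : String)
    (out : PySem.Dict String (Option Int)) :
    (match o with
      | some p => match p.2 with
        | some v => out.insert c (some v)
        | none => out
      | none => out) = if pvVal o ≠ none then out.insert c (pvVal o) else out := by
  cases o with
  | none => simp [pvVal]
  | some p => cases hp : p.2 <;> simp [pvVal, hp]

theorem pv_rank_isNone (k : String) : (pvRank k).isNone = !pvKnownTupleA k := by
  by_cases h1 : k = "msg_id"; · subst h1; rfl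
  by_cases h2 : k = "msgId"; · subst h2; rfl
  by_cases h3 : k = "id"; · subst h3; rfl
  by_cases h4 : k = "payload"; · subst h4; rfl
  by_cases h5 : k = "p"; · subst h5; rfl
  by_cases h6 : k = "seq"; · subst h6; rfl
  by_cases h7 : k = "s"; · subst h7; rfl
  by_cases h8 : k = "flags"; · subst h8; rfl
  by_cases h9 : k = "f"; · subst h9; rfl
  by_cases h10 : k = "checksum"; · subst h10; rfl
  by_cases h11 : k = "csum"; · subst h11; rfl
  simp [pvRank, pvKnownTupleA, h1, h2, h3, h4, h5, h6, h7, h8, h9, h10, h11]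

theorem pv_foldl_filter (p : String × Option Int → Bool) (l : List (String × Option Int))
    (o : PySem.Dict String (Option Int)) :
    l.foldl (fun o kv => if ¬ p kv then o.insert kv.1 kv.2 else o) o
      = (l.filter (fun kv => !(p kv))).foldl (fun o kv => o.insert kv.1 kv.2) o := by
  induction l generalizing o with
  | nil => rfl
  | cons kv rest ih =>
    rw [List.foldl_cons, List.filter_cons]
    cases h : p kv
    · rw [if_pos (by simp : ¬ false = true), if_pos (by simp : (!false) = true),
        List.foldl_cons]
      exact ih _
    · rw [if_neg (by simp : ¬ ¬ true = true), if_neg (by simp : ¬ (!true) = true)]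
      exact ih _

theorem pv_update_eq_foldl (d : PySem.Dict String (Option Int))
    (l : List (String × Option Int)) :
    d.update l = l.foldl (fun o kv => o.insert kv.1 kv.2) d := by
  induction l generalizing d with
  | nil => rfl
  | cons kv rest ih => simp [PySem.Dict.update, List.foldl_cons]

-- ===== VERDICT (by name: the statement is the Claim_ definition above) =====
theorem frame_normalize_shape_py_spec : Claim_equal_frame_normalize_shape_py := by
  intro frame _
  show frame_normalize_shape_py frame = frame_normalize_shape_py_alt frame
  simp only [frame_normalize_shape_py, frame_normalize_shape_py_alt,
    List.foldl_cons, List.foldl_nil]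
  rw [pv_fold_snd]
  simp only [List.nil_append, PySem.Dict.getD_eq_get?_getD, pv_fold_fst_get?', pv_mk_get?,
    pv_getD_snd, pv_opt_insert]
  simp only [pv_chain_msg, pv_chain_two "payload" "payload" "p" pv_entry_payload,
    pv_chain_two "seq" "seq" "s" pv_entry_seq, pv_chain_two "flags" "flags" "f" pv_entry_flags,
    pv_chain_two "checksum" "checksum" "csum" pv_entry_checksum,
    pv_val_match3, pv_val_match2]
  rw [pv_foldl_filter (fun kv => pvKnownTupleA kv.1), pv_update_eq_foldl]
  simp only [pv_rank_isNone]
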